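-- pv_equiv track=rewrite | github.com/Sallyrideauto/Baekjoon | 백준/Bronze/2476. 주사위 게임/주사위 게임.py | prize
-- ===== SOURCE A (Python) =====
-- def prize(rolls):
--     count = [0] * 7
--     for roll in rolls:
--         count[roll] += 1
--     for i in range(1, 7):
--         if count[i] == 3:
--             return 10000 + i * 1000
--         elif count[i] == 2:
--             return 1000 + i * 100
--     return max(rolls) * 100
-- ===== SOURCE B (Python) =====
-- def prize(rolls):
--     tally = [0] * 7
--     for r in rolls:
--         tally[r] += 1
--
--     def award(counts, face):
--         if not counts:
--             return max(rolls) * 100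
--         if counts[0] == 2:
--             return 1000 + face * 100
--         if counts[0] == 3:
--             return 10000 + face * 1000
--         return award(counts[1:], face + 1)
--
--     return award(tally[1:], 1)
-- ===== Notes on version B (the rewrite author's own statement) =====
-- stated objective: alternative
-- what changed: Keeps the list-indexed tally pass (which fixes the function's exact domain, including which inputs raise) but replaces the imperative range(1,7) scan with indexed lookups and early returns by a recursive selection helper that structurally consumes the tally list itself, checks the pair case before the triple case, and carries the no-prize fallback at the recursion base; a decomposition change (index loop to list recursion), not a new algorithm, since any exact re-implementation must reproduce the table's indexing semantics.
-- outside the precondition, e.g. on prize([]): A raises ValueError, B raises ValueError; on prize([1, 2, 7]): A raises IndexError, B raises IndexError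
import Mathlib
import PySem

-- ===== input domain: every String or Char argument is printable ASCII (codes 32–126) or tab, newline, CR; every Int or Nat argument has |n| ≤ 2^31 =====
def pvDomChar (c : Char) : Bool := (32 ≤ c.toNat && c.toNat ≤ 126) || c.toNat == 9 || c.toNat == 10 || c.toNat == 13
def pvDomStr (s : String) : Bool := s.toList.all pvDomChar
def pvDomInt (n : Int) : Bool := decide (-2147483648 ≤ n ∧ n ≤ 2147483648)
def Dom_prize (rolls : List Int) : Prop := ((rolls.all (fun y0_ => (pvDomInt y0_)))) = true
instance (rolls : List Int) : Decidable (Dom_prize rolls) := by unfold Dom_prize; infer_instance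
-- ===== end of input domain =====

-- B keeps A's list-indexed tally pass (it fixes the exact domain) but replaces the
-- indexed range(1,7) scan by a recursive selection helper that consumes the tally list
-- itself, checking the pair case before the triple case; equality proved on Pre_prize.


-- ===== PORT A =====
-- the 'for i in range(1, 7)' loop with its early returns
def prizeScan (count : List Int) : List Int → Option Int
  | [] => none
  | i :: rest =>
    if PySem.List.pyGetD count i 0 = 3 then some (10000 + i * 1000)
    else if PySem.List.pyGetD count i 0 = 2 then some (1000 + i * 100)
    else prizeScan count rest

def prize (rolls : List Int) : Int :=
  let count := rolls.foldl
    (fun c roll => PySem.List.pySetD c roll (PySem.List.pyGetD c roll 0 + 1))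
    (List.replicate 7 (0 : Int))
  match prizeScan count (PySem.List.pyRange 1 7 1) with
  | some v => v
  | none => (PySem.List.max? rolls (fun x => x)).getD 0 * 100   -- max(rolls); raises on [], excluded by Pre_

-- ===== PORT B =====
-- the recursive helper 'award(counts, face)'
def awardGo (rolls : List Int) : List Int → Int → Int
  | [], _ => (PySem.List.max? rolls (fun x => x)).getD 0 * 100   -- max(rolls); raises on [], excluded by Pre_
  | n :: rest, face =>
    if n = 2 then 1000 + face * 100
    else if n = 3 then 10000 + face * 1000
    else awardGo rolls rest (face + 1)

def prize_alt (rolls : List Int) : Int :=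
  let tally := rolls.foldl
    (fun c r => PySem.List.pySetD c r (PySem.List.pyGetD c r 0 + 1))
    (List.replicate 7 (0 : Int))
  awardGo rolls (PySem.List.slice tally (some 1) none) 1   -- award(tally[1:], 1)

-- ===== PRECONDITION & SPEC =====
-- Pre_ is exactly the set of inputs on which A returns: a roll outside -7..6 raises
-- IndexError in the counting pass, and the empty list raises ValueError in max([]).
def Pre_prize (rolls : List Int) : Prop :=
  rolls ≠ [] ∧ ∀ r ∈ rolls, -7 ≤ r ∧ r ≤ 6
instance (rolls : List Int) : Decidable (Pre_prize rolls) := by unfold Pre_prize; infer_instance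

def pvWitness_prize : List Int := [3, 5, 3]

def Spec_prize (rolls : List Int) (out : Int) : Prop := out = prize_alt rolls
instance (rolls : List Int) (out : Int) : Decidable (Spec_prize rolls out) := by unfold Spec_prize; infer_instance

-- ===== CLAIM (what is proved, stated in full; the proofs are below) =====
def Claim_equal_prize : Prop := ∀ (rolls : List Int), Dom_prize rolls → Pre_prize rolls → Spec_prize rolls (prize rolls)

-- ===== LEMMAS AND PROOFS =====

-- the counting pass preserves the table's length
theorem tally_length : ∀ (rolls c : List Int),
    (rolls.foldl (fun c r => PySem.List.pySetD c r (PySem.List.pyGetD c r 0 + 1)) c).length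
    = c.length
  | [], _ => rfl
  | r :: t, c => by
    rw [List.foldl_cons, tally_length t, PySem.List.length_pySetD]

-- on a 7-entry table the indexed face scan and the list-consuming recursion agree
theorem sel_eq (rolls : List Int) (c0 c1 c2 c3 c4 c5 c6 : Int) :
    (match prizeScan [c0, c1, c2, c3, c4, c5, c6] [1, 2, 3, 4, 5, 6] with
      | some v => v
      | none => (PySem.List.max? rolls (fun x => x)).getD 0 * 100)
    = awardGo rolls [c1, c2, c3, c4, c5, c6] 1 := by
  have e1 : PySem.List.pyGetD [c0, c1, c2, c3, c4, c5, c6] 1 0 = c1 := rfl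
  have e2 : PySem.List.pyGetD [c0, c1, c2, c3, c4, c5, c6] 2 0 = c2 := rfl
  have e3 : PySem.List.pyGetD [c0, c1, c2, c3, c4, c5, c6] 3 0 = c3 := rfl
  have e4 : PySem.List.pyGetD [c0, c1, c2, c3, c4, c5, c6] 4 0 = c4 := rfl
  have e5 : PySem.List.pyGetD [c0, c1, c2, c3, c4, c5, c6] 5 0 = c5 := rfl
  have e6 : PySem.List.pyGetD [c0, c1, c2, c3, c4, c5, c6] 6 0 = c6 := rfl
  rw [prizeScan, awardGo, e1]
  by_cases h1a : c1 = 3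
  · simp [h1a]
  · by_cases h1b : c1 = 2
    · simp [h1b]
    · simp only [if_neg h1a, if_neg h1b]
      rw [prizeScan, awardGo, e2]
      by_cases h2a : c2 = 3
      · simp [h2a]
      · by_cases h2b : c2 = 2
        · simp [h2b]
        · simp only [if_neg h2a, if_neg h2b]
          rw [prizeScan, awardGo, e3]
          by_cases h3a : c3 = 3
          · simp [h3a]
          · by_cases h3b : c3 = 2
            · simp [h3b]
            · simp only [if_neg h3a, if_neg h3b]
              rw [prizeScan, awardGo, e4]
              by_cases h4a : c4 = 3
              · simp [h4a]
              · by_cases h4b : c4 = 2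
                · simp [h4b]
                · simp only [if_neg h4a, if_neg h4b]
                  rw [prizeScan, awardGo, e5]
                  by_cases h5a : c5 = 3
                  · simp [h5a]
                  · by_cases h5b : c5 = 2
                    · simp [h5b]
                    · simp only [if_neg h5a, if_neg h5b]
                      rw [prizeScan, awardGo, e6]
                      by_cases h6a : c6 = 3
                      · simp [h6a]
                      · by_cases h6b : c6 = 2
                        · simp [h6b]
                        · simp only [if_neg h6a, if_neg h6b]
                          rw [prizeScan, awardGo]

-- ===== VERDICT (by name: the statement is the Claim_ definition above) =====
theorem prize_spec : Claim_equal_prize := by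
  intro rolls _ _
  show prize rolls = prize_alt rolls
  simp only [prize, prize_alt]
  have hlen : (rolls.foldl
      (fun c r => PySem.List.pySetD c r (PySem.List.pyGetD c r 0 + 1))
      (List.replicate 7 (0 : Int))).length = 7 := by
    rw [tally_length]; rfl
  have h16 : PySem.List.pyRange 1 7 1 = [1, 2, 3, 4, 5, 6] := by decide
  rw [h16]
  generalize hT : rolls.foldl
      (fun c r => PySem.List.pySetD c r (PySem.List.pyGetD c r 0 + 1))
      (List.replicate 7 (0 : Int)) = tally at hlen ⊢
  match tally, hlen with
  | [c0, c1, c2, c3, c4, c5, c6], _ =>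
    rw [PySem.List.slice_from _ (by norm_num)]
    exact sel_eq rolls c0 c1 c2 c3 c4 c5 c6
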